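-- pv_equiv track=rewrite | github.com/Mong-Gu/Algorithm-Study | programmers/타겟넘버.py | solution
-- ===== SOURCE A (Python) =====
-- def solution(numbers, target):
--     answer = [0]
--     for i in numbers:
--         tmp_lst = []
--         for j in answer:
--             tmp_lst.append(j+i)
--             tmp_lst.append(j-i)
--         answer = tmp_lst
--     return answer
-- ===== SOURCE B (Python) =====
-- def solution(numbers, target):
--     result = []
--
--     def dfs(idx, total):
--         if idx == len(numbers):
--             result.append(total)
--             return
--         dfs(idx + 1, total + numbers[idx])
--         dfs(idx + 1, total - numbers[idx])
--
--     dfs(0, 0)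
--     return result
-- ===== Notes on version B (the rewrite author's own statement) =====
-- stated objective: idiomatic
-- what changed: Replaced the iterative breadth-first rebuilding of the whole sum list at each number by the canonical depth-first recursion carrying a running total and an index, appending to the result when the index reaches the end.
import Mathlib
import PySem

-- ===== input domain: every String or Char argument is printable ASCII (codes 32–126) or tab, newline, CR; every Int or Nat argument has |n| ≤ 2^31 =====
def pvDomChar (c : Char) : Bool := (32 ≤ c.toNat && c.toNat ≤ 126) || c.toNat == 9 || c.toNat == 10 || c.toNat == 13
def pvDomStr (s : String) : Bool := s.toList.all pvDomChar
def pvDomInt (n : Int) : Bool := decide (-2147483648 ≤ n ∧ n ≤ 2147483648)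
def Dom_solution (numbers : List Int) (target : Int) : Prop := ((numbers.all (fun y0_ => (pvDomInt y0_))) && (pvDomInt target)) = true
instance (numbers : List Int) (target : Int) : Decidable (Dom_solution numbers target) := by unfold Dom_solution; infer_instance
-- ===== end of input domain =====

-- B replaces A's level-by-level rebuilding of the sum list with the canonical
-- depth-first recursion on an index and a running total (idiomatic decomposition).

-- ===== PORT A =====
-- outer loop over numbers; inner loop rebuilds tmp_lst from answer
def solution (numbers : List Int) (target : Int) : List Int :=
  numbers.foldl
    (fun answer i => answer.foldl (fun tmp_lst j => tmp_lst ++ [j + i, j - i]) [])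
    [0]

-- ===== PORT B =====
-- dfs over the remaining suffix of numbers, carrying the running total;
-- Python's shared `result` list receives the + branch's appends before the - branch's,
-- which is exactly the left-to-right concatenation below.
def dfsB : List Int → Int → List Int
  | [], total => [total]
  | n :: rest, total => dfsB rest (total + n) ++ dfsB rest (total - n)

def solution_alt (numbers : List Int) (target : Int) : List Int :=
  dfsB numbers 0

-- ===== PRECONDITION & SPEC =====
def Spec_solution (numbers : List Int) (target : Int) (out : List Int) : Prop := out = solution_alt numbers target
instance (numbers : List Int) (target : Int) (out : List Int) : Decidable (Spec_solution numbers target out) := by unfold Spec_solution; infer_instance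

-- ===== CLAIM (what is proved, stated in full; the proofs are below) =====
def Claim_equal_solution : Prop := ∀ (numbers : List Int) (target : Int), Dom_solution numbers target → Spec_solution numbers target (solution numbers target)

-- ===== LEMMAS AND PROOFS =====
theorem inner_foldl_eq_flatMap (i : Int) (answer acc : List Int) :
    answer.foldl (fun tmp_lst j => tmp_lst ++ [j + i, j - i]) acc
      = acc ++ answer.flatMap (fun j => [j + i, j - i]) := by
  induction answer generalizing acc with
  | nil => simp
  | cons j rest ih => simp [List.foldl, ih, List.append_assoc]

theorem foldA_eq_flatMap_dfsB (numbers L : List Int) :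
    numbers.foldl
      (fun answer i => answer.foldl (fun tmp_lst j => tmp_lst ++ [j + i, j - i]) [])
      L = L.flatMap (dfsB numbers) := by
  induction numbers generalizing L with
  | nil => simp [dfsB]
  | cons i rest ih =>
    rw [List.foldl_cons, inner_foldl_eq_flatMap, List.nil_append, ih,
      List.flatMap_assoc]
    congr 1
    funext j
    simp [dfsB]

-- ===== VERDICT (by name: the statement is the Claim_ definition above) =====
theorem solution_spec : Claim_equal_solution := by
  intro numbers target _
  show solution numbers target = solution_alt numbers target
  rw [solution, solution_alt, foldA_eq_flatMap_dfsB]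
  simp
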